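-- pv_equiv track=rewrite | github.com/Rouhija/Taskmaster | taskmaster/tests/test_daemon.py | prog_status
-- ===== SOURCE A (Python) =====
-- def prog_status(resp, p, stat):
--     flag = False
--     resp = resp.split('|')
--     for line in resp:
--         if line and (p in line or p == 'all'):
--             if stat in line:
--                 flag = True
--             else:
--                 flag = False
--     return flag
-- ===== SOURCE B (Python) =====
-- def prog_status(resp, p, stat):
--     for line in reversed(resp.split('|')):
--         if line and (p in line or p == 'all'):
--             return stat in line
--     return False
-- ===== Notes on version B (the rewrite author's own statement) =====
-- stated objective: simpler
-- what changed: B replaces A's forward accumulate-and-overwrite flag loop with a reverse scan that returns on the first (i.e. last forward) matching non-empty line, eliminating the flag variable.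
import Mathlib
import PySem

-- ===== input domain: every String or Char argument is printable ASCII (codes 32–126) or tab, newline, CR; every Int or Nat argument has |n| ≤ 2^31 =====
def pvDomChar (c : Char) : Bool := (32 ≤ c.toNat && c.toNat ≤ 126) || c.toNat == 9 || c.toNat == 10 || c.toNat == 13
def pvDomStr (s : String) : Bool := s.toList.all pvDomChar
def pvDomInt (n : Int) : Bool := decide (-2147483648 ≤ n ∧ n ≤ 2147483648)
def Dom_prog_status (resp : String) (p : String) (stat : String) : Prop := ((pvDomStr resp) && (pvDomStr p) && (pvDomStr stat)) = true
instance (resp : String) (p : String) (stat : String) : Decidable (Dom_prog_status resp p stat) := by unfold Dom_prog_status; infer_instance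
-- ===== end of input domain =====

-- B replaces A's forward accumulate-and-overwrite flag loop with a reverse scan that
-- returns on the first (= last forward) matching non-empty line; no flag variable. Same cost.

-- ===== PORT A =====
-- literal port of A: fold a flag over the split, overwriting it on every matching line.
-- sep "|" is a non-empty literal, so split? is always some; .getD [] is never taken.
def prog_status (resp : String) (p : String) (stat : String) : Bool :=
  ((PySem.Str.split? resp "|").getD []).foldl
    (fun flag line =>
      if !(line == "") && (PySem.Str.isIn p line || p == "all") then
        (if PySem.Str.isIn stat line then true else false)
      else flag)
    false

-- ===== PORT B =====
-- scan the reversed split; the first matching non-empty line decides the answer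
def progStatusRevScan (p : String) (stat : String) : List String → Bool
  | [] => false
  | line :: rest =>
    if !(line == "") && (PySem.Str.isIn p line || p == "all") then
      PySem.Str.isIn stat line
    else progStatusRevScan p stat rest

def prog_status_alt (resp : String) (p : String) (stat : String) : Bool :=
  progStatusRevScan p stat ((PySem.Str.split? resp "|").getD []).reverse

-- ===== PRECONDITION & SPEC =====
def Spec_prog_status (resp : String) (p : String) (stat : String) (out : Bool) : Prop := out = prog_status_alt resp p stat
instance (resp : String) (p : String) (stat : String) (out : Bool) : Decidable (Spec_prog_status resp p stat out) := by unfold Spec_prog_status; infer_instance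

-- ===== CLAIM (what is proved, stated in full; the proofs are below) =====
def Claim_equal_prog_status : Prop := ∀ (resp : String) (p : String) (stat : String), Dom_prog_status resp p stat → Spec_prog_status resp p stat (prog_status resp p stat)

-- ===== LEMMAS AND PROOFS =====

theorem revScan_append (p stat : String) (m : List String) (x : String) :
    progStatusRevScan p stat (m ++ [x]) =
      if m.any (fun line => !(line == "") && (PySem.Str.isIn p line || p == "all")) then
        progStatusRevScan p stat m
      else progStatusRevScan p stat [x] := by
  induction m with
  | nil => simp
  | cons y m ih =>
    cases hy : (!(y == "") && (PySem.Str.isIn p y || p == "all")) with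
    | true =>
      simp only [List.cons_append, progStatusRevScan, List.any_cons, hy, Bool.true_or,
        if_true]
    | false =>
      simp only [List.cons_append, progStatusRevScan, List.any_cons, hy, Bool.false_or,
        Bool.false_eq_true, if_false, ih]

theorem revScan_none (p stat : String) (l : List String)
    (h : l.any (fun line => !(line == "") && (PySem.Str.isIn p line || p == "all")) = false) :
    progStatusRevScan p stat l = false := by
  induction l with
  | nil => rfl
  | cons x l ih =>
    simp only [List.any_cons, Bool.or_eq_false_iff] at h
    simp only [progStatusRevScan, h.1, Bool.false_eq_true, if_false, ih h.2]

theorem fold_eq_revScan (p stat : String) (l : List String) (flag : Bool) :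
    l.foldl
      (fun flag line =>
        if !(line == "") && (PySem.Str.isIn p line || p == "all") then
          (if PySem.Str.isIn stat line then true else false)
        else flag) flag =
      (if l.any (fun line => !(line == "") && (PySem.Str.isIn p line || p == "all")) then
        progStatusRevScan p stat l.reverse
      else flag) := by
  induction l generalizing flag with
  | nil => simp
  | cons x l ih =>
    simp only [List.foldl_cons, List.reverse_cons, List.any_cons]
    rw [ih, revScan_append]
    have hrev : l.reverse.any (fun line => !(line == "") && (PySem.Str.isIn p line || p == "all"))
        = l.any (fun line => !(line == "") && (PySem.Str.isIn p line || p == "all")) :=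
      List.any_reverse ..
    rw [hrev]
    cases hl : l.any (fun line => !(line == "") && (PySem.Str.isIn p line || p == "all")) with
    | true => simp only [Bool.or_true, if_true]
    | false =>
      cases hx : (!(x == "") && (PySem.Str.isIn p x || p == "all")) with
      | true =>
        simp only [hx, Bool.true_or, Bool.false_eq_true, if_false, if_true,
          progStatusRevScan]
        cases PySem.Str.isIn stat x <;> simp
      | false =>
        simp only [Bool.false_or, Bool.false_eq_true, if_false]

-- ===== VERDICT (by name: the statement is the Claim_ definition above) =====
theorem prog_status_spec : Claim_equal_prog_status := by
  intro resp p stat _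
  unfold Spec_prog_status prog_status prog_status_alt
  rw [fold_eq_revScan]
  cases h : ((PySem.Str.split? resp "|").getD []).any
      (fun line => !(line == "") && (PySem.Str.isIn p line || p == "all")) with
  | true => simp only [if_true]
  | false =>
    rw [revScan_none p stat _ (by rw [List.any_reverse]; exact h)]
    simp only [Bool.false_eq_true, if_false]
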